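-- pv_equiv track=rewrite | github.com/abhi-1907/flood_prediction | backend/agents/prediction/model_selector.py | infer_group_from_features
-- ===== SOURCE A (Python) =====
-- def infer_group_from_features(feature_cols: list[str]) -> str:
--     """
--     Given available columns, pick the best-matching trained feature group.
--     Used to load the right specialised model variant.
--     """
--     has_weather = any(f in feature_cols for f in ["rain_mm_weekly", "temp_c_mean", "rain_mm_monthly"])
--     has_hydro   = any(f in feature_cols for f in ["dam_count_50km", "dist_major_river_km", "waterbody_nearby"])
--     has_terrain = any(f in feature_cols for f in ["elevation_m", "slope_degree", "terrain_type_encoded"])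
--
--     if has_weather and has_hydro and has_terrain:
--         return "all"
--     if has_weather and has_hydro:
--         return "weather_hydro"
--     if has_weather and has_terrain:
--         return "weather_terrain"
--     if has_hydro and has_terrain:
--         return "hydro_terrain"
--     if has_weather:
--         return "weather"
--     if has_hydro:
--         return "hydro"
--     if has_terrain:
--         return "terrain"
--     return "all"   # default
-- ===== SOURCE B (Python) =====
-- def infer_group_from_features(feature_cols: list[str]) -> str:
--     """
--     Given available columns, pick the best-matching trained feature group.
--     Used to load the right specialised model variant.
--     """
--     groups = [
--         ("weather", ["rain_mm_weekly", "temp_c_mean", "rain_mm_monthly"]),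
--         ("hydro",   ["dam_count_50km", "dist_major_river_km", "waterbody_nearby"]),
--         ("terrain", ["elevation_m", "slope_degree", "terrain_type_encoded"]),
--     ]
--     present = [name for name, cols in groups if any(c in feature_cols for c in cols)]
--     if len(present) in (0, 3):
--         return "all"
--     return "_".join(present)
-- ===== Notes on version B (the rewrite author's own statement) =====
-- stated objective: simpler
-- what changed: Replaces the 7-branch if/return cascade with a data-driven table of (name, columns) groups: present names are collected once and the result is 'all' when 0 or 3 groups match, else '_'.join(present).
import Mathlib
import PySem

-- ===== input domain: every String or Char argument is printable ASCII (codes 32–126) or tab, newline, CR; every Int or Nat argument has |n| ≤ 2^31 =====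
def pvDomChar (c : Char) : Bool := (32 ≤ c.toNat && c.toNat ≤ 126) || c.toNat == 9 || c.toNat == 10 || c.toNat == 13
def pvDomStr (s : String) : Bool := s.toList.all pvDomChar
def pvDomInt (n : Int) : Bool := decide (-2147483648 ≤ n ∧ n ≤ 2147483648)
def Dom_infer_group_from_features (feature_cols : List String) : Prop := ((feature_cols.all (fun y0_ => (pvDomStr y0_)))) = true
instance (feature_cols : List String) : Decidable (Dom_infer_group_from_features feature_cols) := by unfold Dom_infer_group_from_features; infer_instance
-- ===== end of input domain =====

-- B replaces A's 7-branch return cascade with a data-driven (name, columns) table,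
-- collecting present group names once and joining them; objective: simpler.

-- ===== PORT A =====
def infer_group_from_features (feature_cols : List String) : String :=
  let has_weather := (["rain_mm_weekly", "temp_c_mean", "rain_mm_monthly"]).any
    (fun f => feature_cols.contains f)
  let has_hydro := (["dam_count_50km", "dist_major_river_km", "waterbody_nearby"]).any
    (fun f => feature_cols.contains f)
  let has_terrain := (["elevation_m", "slope_degree", "terrain_type_encoded"]).any
    (fun f => feature_cols.contains f)
  if has_weather && has_hydro && has_terrain then "all"
  else if has_weather && has_hydro then "weather_hydro"
  else if has_weather && has_terrain then "weather_terrain"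
  else if has_hydro && has_terrain then "hydro_terrain"
  else if has_weather then "weather"
  else if has_hydro then "hydro"
  else if has_terrain then "terrain"
  else "all"

-- ===== PORT B =====
def infer_group_from_features_alt (feature_cols : List String) : String :=
  let groups : List (String × List String) :=
    [("weather", ["rain_mm_weekly", "temp_c_mean", "rain_mm_monthly"]),
     ("hydro",   ["dam_count_50km", "dist_major_river_km", "waterbody_nearby"]),
     ("terrain", ["elevation_m", "slope_degree", "terrain_type_encoded"])]
  let present :=
    (groups.filter (fun g => g.2.any (fun c => feature_cols.contains c))).map Prod.fst
  if present.length = 0 ∨ present.length = 3 then "all"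
  else PySem.Str.join "_" present

-- ===== PRECONDITION & SPEC =====
def Spec_infer_group_from_features (feature_cols : List String) (out : String) : Prop := out = infer_group_from_features_alt feature_cols
instance (feature_cols : List String) (out : String) : Decidable (Spec_infer_group_from_features feature_cols out) := by unfold Spec_infer_group_from_features; infer_instance

-- ===== CLAIM (what is proved, stated in full; the proofs are below) =====
def Claim_equal_infer_group_from_features : Prop := ∀ (feature_cols : List String), Dom_infer_group_from_features feature_cols → Spec_infer_group_from_features feature_cols (infer_group_from_features feature_cols)

-- ===== LEMMAS AND PROOFS =====

-- ===== VERDICT (by name: the statement is the Claim_ definition above) =====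
theorem infer_group_from_features_spec : Claim_equal_infer_group_from_features := by
  intro fc _
  unfold Spec_infer_group_from_features infer_group_from_features infer_group_from_features_alt
  cases hw : (["rain_mm_weekly", "temp_c_mean", "rain_mm_monthly"]).any
      (fun f => fc.contains f) <;>
  cases hh : (["dam_count_50km", "dist_major_river_km", "waterbody_nearby"]).any
      (fun f => fc.contains f) <;>
  cases ht : (["elevation_m", "slope_degree", "terrain_type_encoded"]).any
      (fun f => fc.contains f) <;>
  simp only [List.filter_cons, List.filter_nil, hw, hh, ht] <;> rfl
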